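-- pv_equiv track=rewrite | github.com/NhuYGian07/RLC_Simulator | physics.py | trouver_chemins_fermes
-- ===== SOURCE A (Python) =====
-- def trouver_chemins_fermes(graphe, source_id, max_depth=15):
--     """Trouve tous les chemins ORIENTÉS qui partent de la source et y reviennent.
--
--     Suit le sens des flèches dans le graphe orienté.
--     """
--     chemins = []
--
--     def dfs(current, path, visited):
--         if len(path) > max_depth:
--             return
--
--         for successeur in graphe.get(current, set()):
--             if successeur == source_id and len(path) >= 1:
--                 # Chemin fermé trouvé !
--                 chemins.append(list(path))
--             elif successeur not in visited:
--                 visited.add(successeur)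
--                 dfs(successeur, path + [successeur], visited)
--                 visited.remove(successeur)
--
--     # Démarrer depuis les successeurs directs de la source
--     for successeur in graphe.get(source_id, set()):
--         dfs(successeur, [successeur], {successeur})
--
--     return chemins
-- ===== SOURCE B (Python) =====
-- _DONE = object()
--
-- def trouver_chemins_fermes(graphe, source_id, max_depth=15):
--     """Iterative DFS with an explicit stack of (path, successor-iterator) frames."""
--     chemins = []
--     if max_depth < 1:
--         return chemins
--     stack = [([s], iter(graphe.get(s, []))) for s in graphe.get(source_id, [])]
--     stack.reverse()  # list top = stack[-1]; first direct successor explored first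
--     while stack:
--         path, it = stack[-1]
--         s = next(it, _DONE)
--         if s is _DONE:
--             stack.pop()
--         elif s == source_id:
--             chemins.append(list(path))
--         elif s not in path and len(path) < max_depth:
--             stack.append((path + [s], iter(graphe.get(s, []))))
--     return chemins
-- ===== Notes on version B (the rewrite author's own statement) =====
-- stated objective: alternative
-- what changed: The recursive DFS with a mutable visited set and closure-captured output list is replaced by an iterative DFS over an explicit stack of (path, successor-iterator) frames, testing membership directly on the current path and applying the depth guard at frame creation, emitting cycles in the same pre-order.
import Mathlib
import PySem

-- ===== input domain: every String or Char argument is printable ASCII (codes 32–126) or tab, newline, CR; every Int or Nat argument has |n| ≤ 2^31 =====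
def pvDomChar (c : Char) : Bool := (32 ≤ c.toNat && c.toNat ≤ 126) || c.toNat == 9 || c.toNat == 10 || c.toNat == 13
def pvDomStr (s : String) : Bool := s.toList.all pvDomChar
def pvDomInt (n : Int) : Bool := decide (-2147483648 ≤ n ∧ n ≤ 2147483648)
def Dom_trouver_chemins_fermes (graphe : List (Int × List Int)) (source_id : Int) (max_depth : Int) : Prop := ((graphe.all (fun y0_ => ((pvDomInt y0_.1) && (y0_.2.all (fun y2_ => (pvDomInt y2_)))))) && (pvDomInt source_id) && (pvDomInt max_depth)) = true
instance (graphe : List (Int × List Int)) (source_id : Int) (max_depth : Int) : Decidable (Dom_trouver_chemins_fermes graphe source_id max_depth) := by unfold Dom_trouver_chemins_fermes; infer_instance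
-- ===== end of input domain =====

-- B replaces A's recursive DFS by an iterative DFS over an explicit stack of
-- (path, remaining-successors) frames (objective: alternative decomposition, same cost).

-- ===== PORT A =====
-- graphe.get(k, default-empty): association-list lookup, first match
def pvSuccs (graphe : List (Int × List Int)) (k : Int) : List Int :=
  match graphe.find? (fun p => p.1 == k) with
  | some p => p.2
  | none => []

-- literal port of A's inner `dfs` (mutable `chemins`/`visited` threaded as state and returned)
def dfsA (graphe : List (Int × List Int)) (source_id max_depth : Int)
    (current : Int) (path : List Int) (visited : PySem.Set Int)
    (chemins : List (List Int)) : List (List Int) × PySem.Set Int :=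
  if (path.length : Int) > max_depth then (chemins, visited)
  else
    (pvSuccs graphe current).foldl
      (fun st successeur =>
        if successeur = source_id ∧ 1 ≤ (path.length : Int) then
          (st.1 ++ [path], st.2)
        else if PySem.Set.contains st.2 successeur = false then
          -- visited.add(successeur); dfs(...); visited.remove(successeur)
          -- (`remove` ported as `discard`: successeur was just added, so it is
          --  present and Python's remove cannot raise here)
          let r := dfsA graphe source_id max_depth successeur (path ++ [successeur])
                     (PySem.Set.add st.2 successeur) st.1
          (r.1, PySem.Set.discard r.2 successeur)
        else st)
      (chemins, visited)
termination_by max_depth.toNat + 1 - path.length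
decreasing_by simp; omega

def trouver_chemins_fermes (graphe : List (Int × List Int)) (source_id : Int) (max_depth : Int) : List (List Int) :=
  (pvSuccs graphe source_id).foldl
    (fun chemins successeur =>
      (dfsA graphe source_id max_depth successeur [successeur]
        (PySem.Set.ofList [successeur]) chemins).1)
    []

-- ===== PORT B =====
-- termination machinery for the stack loop
def pvMaxSucc (graphe : List (Int × List Int)) : Nat :=
  graphe.foldl (fun m p => max m p.2.length) 0

def pvWt (graphe : List (Int × List Int)) (max_depth : Int) (f : List Int × List Int) : Nat :=
  (f.2.length + 1) * (pvMaxSucc graphe + 2) ^ (max_depth.toNat + 1 - f.1.length)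

theorem pvMaxSucc_le_foldl (g : List (Int × List Int)) : ∀ a b : Nat, a ≤ b →
    a ≤ g.foldl (fun m p => max m p.2.length) b := by
  induction g with
  | nil => intro a b h; simpa using h
  | cons p g ih => intro a b h; exact ih a (max b p.2.length) (le_trans h (le_max_left _ _))

theorem pvFoldl_mono (g : List (Int × List Int)) : ∀ a b : Nat, a ≤ b →
    g.foldl (fun m p => max m p.2.length) a ≤ g.foldl (fun m p => max m p.2.length) b := by
  induction g with
  | nil => intro a b h; simpa using h
  | cons p g ih => intro a b h; exact ih _ _ (max_le_max h le_rfl)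

theorem pvSuccs_cons (p : Int × List Int) (g : List (Int × List Int)) (k : Int) :
    pvSuccs (p :: g) k = if p.1 == k then p.2 else pvSuccs g k := by
  by_cases h : (p.1 == k) = true <;> simp [pvSuccs, h]

theorem pvSuccs_length_le (g : List (Int × List Int)) (k : Int) :
    (pvSuccs g k).length ≤ pvMaxSucc g := by
  induction g with
  | nil => simp [pvSuccs, pvMaxSucc]
  | cons p g ih =>
    have hm : pvMaxSucc (p :: g) = g.foldl (fun m q => max m q.2.length) (max 0 p.2.length) := by
      simp [pvMaxSucc]
    rw [pvSuccs_cons, hm]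
    by_cases h : (p.1 == k) = true
    · simp only [h, if_true]
      exact pvMaxSucc_le_foldl g _ _ (le_max_right _ _)
    · simp only [h]
      exact le_trans ih (pvFoldl_mono g 0 (max 0 p.2.length) (Nat.zero_le _))

-- the iterative stack loop of B; Lean's list head is the Python stack top
def loopB (graphe : List (Int × List Int)) (source_id max_depth : Int)
    (stack : List (List Int × List Int)) (chemins : List (List Int)) : List (List Int) :=
  match stack with
  | [] => chemins
  | (path, succs) :: rest =>
    match succs with
    | [] => loopB graphe source_id max_depth rest chemins      -- iterator exhausted: pop
    | s :: ss =>
      if s = source_id then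
        loopB graphe source_id max_depth ((path, ss) :: rest) (chemins ++ [path])
      else if s ∉ path ∧ (path.length : Int) < max_depth then
        loopB graphe source_id max_depth
          ((path ++ [s], pvSuccs graphe s) :: (path, ss) :: rest) chemins
      else
        loopB graphe source_id max_depth ((path, ss) :: rest) chemins
termination_by (stack.map (pvWt graphe max_depth)).sum
decreasing_by
  · have hp : 0 < (pvMaxSucc graphe + 2) ^ (max_depth.toNat + 1 - path.length) :=
      Nat.pow_pos (by omega)
    simp only [List.map_cons, List.sum_cons, pvWt, List.length_nil]
    omega
  · simp only [List.map_cons, List.sum_cons, pvWt, List.length_cons]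
    have hp : 0 < (pvMaxSucc graphe + 2) ^ (max_depth.toNat + 1 - path.length) :=
      Nat.pow_pos (by omega)
    nlinarith [hp]
  · rename_i hcond
    simp only [List.map_cons, List.sum_cons, pvWt, List.length_append, List.length_cons,
      List.length_nil]
    have hL : path.length + 1 ≤ max_depth.toNat := by
      have := hcond.2; omega
    have e1 : max_depth.toNat + 1 - (path.length + 1) = max_depth.toNat - path.length := by omega
    have e2 : max_depth.toNat + 1 - path.length = (max_depth.toNat - path.length) + 1 := by omega
    rw [e1, e2]
    have hc : (pvSuccs graphe s).length + 2 ≤ pvMaxSucc graphe + 2 := by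
      have := pvSuccs_length_le graphe s; omega
    have hp : 0 < (pvMaxSucc graphe + 2) ^ (max_depth.toNat - path.length) :=
      Nat.pow_pos (by omega)
    have key : ((pvSuccs graphe s).length + 1) * (pvMaxSucc graphe + 2) ^ (max_depth.toNat - path.length)
        < (pvMaxSucc graphe + 2) ^ ((max_depth.toNat - path.length) + 1) := by
      rw [pow_succ]
      nlinarith [hp, Nat.mul_le_mul_right ((pvMaxSucc graphe + 2) ^ (max_depth.toNat - path.length)) hc]
    nlinarith [key]
  · simp only [List.map_cons, List.sum_cons, pvWt, List.length_cons]
    have hp : 0 < (pvMaxSucc graphe + 2) ^ (max_depth.toNat + 1 - path.length) :=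
      Nat.pow_pos (by omega)
    nlinarith [hp]

def trouver_chemins_fermes_alt (graphe : List (Int × List Int)) (source_id : Int) (max_depth : Int) : List (List Int) :=
  if max_depth < 1 then []
  else
    loopB graphe source_id max_depth
      ((pvSuccs graphe source_id).map (fun s => ([s], pvSuccs graphe s))) []

-- ===== PRECONDITION & SPEC =====
def Spec_trouver_chemins_fermes (graphe : List (Int × List Int)) (source_id : Int) (max_depth : Int) (out : List (List Int)) : Prop := out = trouver_chemins_fermes_alt graphe source_id max_depth
instance (graphe : List (Int × List Int)) (source_id : Int) (max_depth : Int) (out : List (List Int)) : Decidable (Spec_trouver_chemins_fermes graphe source_id max_depth out) := by unfold Spec_trouver_chemins_fermes; infer_instance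

-- ===== CLAIM (what is proved, stated in full; the proofs are below) =====
def Claim_equal_trouver_chemins_fermes : Prop := ∀ (graphe : List (Int × List Int)) (source_id : Int) (max_depth : Int), Dom_trouver_chemins_fermes graphe source_id max_depth → Spec_trouver_chemins_fermes graphe source_id max_depth (trouver_chemins_fermes graphe source_id max_depth)

-- ===== LEMMAS AND PROOFS =====

-- abstract emission function: cycles emitted by the DFS below path (entry depth guard included)
def pvE (graphe : List (Int × List Int)) (source_id max_depth : Int)
    (current : Int) (path : List Int) : List (List Int) :=
  if (path.length : Int) > max_depth then []
  else
    (pvSuccs graphe current).flatMap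
      (fun s => if s = source_id then [path]
                else if s ∈ path then []
                else pvE graphe source_id max_depth s (path ++ [s]))
termination_by max_depth.toNat + 1 - path.length
decreasing_by simp; omega

-- emissions of one frame (path with the given remaining successors)
def pvF (graphe : List (Int × List Int)) (source_id max_depth : Int)
    (path : List Int) (succs : List Int) : List (List Int) :=
  succs.flatMap
    (fun s => if s = source_id then [path]
              else if s ∈ path then []
              else pvE graphe source_id max_depth s (path ++ [s]))

def pvOut (graphe : List (Int × List Int)) (source_id max_depth : Int)
    (stack : List (List Int × List Int)) : List (List Int) :=
  stack.flatMap (fun f => pvF graphe source_id max_depth f.1 f.2)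

theorem pvE_eq_pvF (graphe : List (Int × List Int)) (source_id max_depth : Int)
    (current : Int) (path : List Int) (h : ¬ ((path.length : Int) > max_depth)) :
    pvE graphe source_id max_depth current path
      = pvF graphe source_id max_depth path (pvSuccs graphe current) := by
  rw [pvE, if_neg h]; rfl

theorem pvE_eq_nil (graphe : List (Int × List Int)) (source_id max_depth : Int)
    (current : Int) (path : List Int) (h : (path.length : Int) > max_depth) :
    pvE graphe source_id max_depth current path = [] := by
  rw [pvE, if_pos h]

theorem loopB_spec (graphe : List (Int × List Int)) (source_id max_depth : Int)
    (stack : List (List Int × List Int)) (chemins : List (List Int)) :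
    loopB graphe source_id max_depth stack chemins
      = chemins ++ pvOut graphe source_id max_depth stack := by
  fun_induction loopB graphe source_id max_depth stack chemins with
  | case1 chemins => simp [pvOut]
  | case2 chemins path rest ih => rw [ih]; simp [pvOut, pvF]
  | case3 chemins path rest ss ih =>
    rw [ih]; simp [pvOut, pvF, List.flatMap_cons, List.append_assoc]
  | case4 chemins path rest s ss hs hcond ih =>
    rw [ih]
    have hguard : ¬ (((path ++ [s]).length : Int) > max_depth) := by
      have := hcond.2; simp; omega
    have hmem : s ∉ path := hcond.1
    simp only [pvOut, pvF, List.flatMap_cons, if_neg hs, if_neg hmem,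
      pvE_eq_pvF graphe source_id max_depth s (path ++ [s]) hguard, pvF,
      List.append_assoc]
  | case5 chemins path rest s ss hs hcond ih =>
    rw [ih]
    simp only [pvOut, pvF, List.flatMap_cons, if_neg hs]
    by_cases hmem : s ∈ path
    · simp [hmem]
    · have hd : max_depth ≤ (path.length : Int) := by
        rcases not_and_or.mp hcond with h | h
        · exact absurd (by simpa using h) hmem
        · omega
      rw [if_neg hmem, pvE_eq_nil graphe source_id max_depth s (path ++ [s]) (by simp; omega)]
      simp

theorem pvDiscard_append_singleton {x : Int} {l : List Int} (h : x ∉ l) :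
    PySem.Set.discard (l ++ [x]) x = l := by
  simp [PySem.Set.discard]
  intro a ha e
  exact h (e ▸ ha)

theorem dfsA_spec (graphe : List (Int × List Int)) (source_id max_depth : Int) :
    ∀ (k : Nat) (current : Int) (path : List Int) (visited : PySem.Set Int)
      (chemins : List (List Int)),
      max_depth.toNat + 1 - path.length ≤ k →
      path ≠ [] →
      (∀ x, PySem.Set.contains visited x = true ↔ x ∈ path) →
      dfsA graphe source_id max_depth current path visited chemins
        = (chemins ++ pvE graphe source_id max_depth current path, visited) := by
  intro k
  induction k with
  | zero =>
    intro current path visited chemins hk hne _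
    have hlen : 1 ≤ path.length := List.length_pos_iff.mpr hne
    have hguard : (path.length : Int) > max_depth := by omega
    rw [dfsA, if_pos hguard, pvE_eq_nil _ _ _ _ _ hguard]
    simp
  | succ k ih =>
    intro current path visited chemins hk hne hinv
    have hlen : 1 ≤ path.length := List.length_pos_iff.mpr hne
    by_cases hguard : (path.length : Int) > max_depth
    · rw [dfsA, if_pos hguard, pvE_eq_nil _ _ _ _ _ hguard]
      simp
    · have hmemv : ∀ x, x ∈ visited ↔ x ∈ path := fun x =>
        (PySem.Set.contains_iff visited x).symm.trans (hinv x)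
      have aux : ∀ (l : List Int) (ch : List (List Int)),
          List.foldl
            (fun st successeur =>
              if successeur = source_id ∧ 1 ≤ (path.length : Int) then
                (st.1 ++ [path], st.2)
              else if PySem.Set.contains st.2 successeur = false then
                ((dfsA graphe source_id max_depth successeur (path ++ [successeur])
                    (PySem.Set.add st.2 successeur) st.1).1,
                 PySem.Set.discard
                   (dfsA graphe source_id max_depth successeur (path ++ [successeur])
                     (PySem.Set.add st.2 successeur) st.1).2 successeur)
              else st)
            (ch, visited) l
          = (ch ++ pvF graphe source_id max_depth path l, visited) := by
        intro l
        induction l with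
        | nil => intro ch; simp [pvF]
        | cons s ss ihs =>
          intro ch
          simp only [List.foldl_cons]
          by_cases hs : s = source_id
          · rw [if_pos ⟨hs, by omega⟩, ihs]
            simp [pvF, hs, List.flatMap_cons]
          · rw [if_neg (fun hc => hs hc.1)]
            by_cases hv : PySem.Set.contains visited s = false
            · have hsv : s ∉ visited := by simpa using hv
              have hsp : s ∉ path := fun hmem => hsv ((hmemv s).mpr hmem)
              rw [if_pos hv]
              have hrec := ih s (path ++ [s]) (PySem.Set.add visited s) ch
                (by simp; omega) (by simp)
                (by
                  intro x
                  rw [PySem.Set.contains_iff, PySem.Set.mem_add, hmemv x]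
                  simp [List.mem_append, or_comm])
              rw [hrec]
              simp only [PySem.Set.add_of_not_mem hsv]
              rw [pvDiscard_append_singleton hsv, ihs]
              simp [pvF, List.flatMap_cons, if_neg hs, if_neg hsp, List.append_assoc]
            · have hsp : s ∈ path := (hinv s).mp (by
                revert hv; cases PySem.Set.contains visited s <;> simp)
              rw [if_neg hv, ihs]
              simp [pvF, List.flatMap_cons, if_neg hs, hsp]
      rw [dfsA, if_neg hguard, pvE_eq_pvF _ _ _ _ _ hguard]
      exact aux (pvSuccs graphe current) chemins

theorem ofList_singleton_contains (s x : Int) :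
    PySem.Set.contains (PySem.Set.ofList [s]) x = true ↔ x ∈ [s] := by
  rw [PySem.Set.contains_iff, PySem.Set.mem_ofList]

theorem portA_eq (graphe : List (Int × List Int)) (source_id max_depth : Int) :
    ∀ (l : List Int) (acc : List (List Int)),
      l.foldl
        (fun chemins successeur =>
          (dfsA graphe source_id max_depth successeur [successeur]
            (PySem.Set.ofList [successeur]) chemins).1)
        acc
      = acc ++ l.flatMap (fun s => pvE graphe source_id max_depth s [s]) := by
  intro l
  induction l with
  | nil => intro acc; simp
  | cons s ss ihs =>
    intro acc
    simp only [List.foldl_cons,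
      dfsA_spec graphe source_id max_depth (max_depth.toNat + 1) s [s]
        (PySem.Set.ofList [s]) acc (by simp) (by simp)
        (ofList_singleton_contains s)]
    rw [ihs]
    simp [List.flatMap_cons, List.append_assoc]

-- ===== VERDICT (by name: the statement is the Claim_ definition above) =====
theorem trouver_chemins_fermes_spec : Claim_equal_trouver_chemins_fermes := by
  intro graphe source_id max_depth _
  unfold Spec_trouver_chemins_fermes trouver_chemins_fermes trouver_chemins_fermes_alt
  rw [portA_eq graphe source_id max_depth (pvSuccs graphe source_id) []]
  by_cases hmd : max_depth < 1
  · rw [if_pos hmd]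
    simp only [List.nil_append]
    have : ∀ s ∈ pvSuccs graphe source_id,
        pvE graphe source_id max_depth s [s] = [] := by
      intro s _
      exact pvE_eq_nil _ _ _ _ _ (by simp; omega)
    simp [List.flatMap_eq_nil_iff.mpr this]
  · rw [if_neg hmd, loopB_spec]
    simp only [List.nil_append, pvOut, List.flatMap_map]
    have he : ∀ s, pvE graphe source_id max_depth s [s]
        = pvF graphe source_id max_depth [s] (pvSuccs graphe s) :=
      fun s => pvE_eq_pvF _ _ _ _ _ (by simp; omega)
    simp [he]
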